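-- pv_equiv track=rewrite | github.com/codeflexi/th8-dcc-backend-v2 | app/tests/test_decisions_regression.py | derive_risk_from_drivers
-- ===== SOURCE A (Python) =====
-- RISK_PRIORITY = ["CRITICAL", "HIGH", "MEDIUM", "LOW"]
--
-- def derive_risk_from_drivers(drivers):
--     if not drivers:
--         return "LOW"
--
--     impacts = [d["impact"] for d in drivers]
--     for p in RISK_PRIORITY:
--         if p in impacts:
--             return p
--     return "LOW"
-- ===== SOURCE B (Python) =====
-- RISK_PRIORITY = ["CRITICAL", "HIGH", "MEDIUM", "LOW"]
--
-- def derive_risk_from_drivers(drivers):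
--     ranks = [RISK_PRIORITY.index(d["impact"]) for d in drivers if d["impact"] in RISK_PRIORITY]
--     return RISK_PRIORITY[min(ranks)] if ranks else "LOW"
-- ===== Notes on version B (the rewrite author's own statement) =====
-- stated objective: alternative
-- what changed: B makes a single pass over the drivers collecting each known impact's rank in RISK_PRIORITY and indexes the priority list at the minimum rank, instead of scanning the priority list with a membership test against the impacts list.
import Mathlib
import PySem

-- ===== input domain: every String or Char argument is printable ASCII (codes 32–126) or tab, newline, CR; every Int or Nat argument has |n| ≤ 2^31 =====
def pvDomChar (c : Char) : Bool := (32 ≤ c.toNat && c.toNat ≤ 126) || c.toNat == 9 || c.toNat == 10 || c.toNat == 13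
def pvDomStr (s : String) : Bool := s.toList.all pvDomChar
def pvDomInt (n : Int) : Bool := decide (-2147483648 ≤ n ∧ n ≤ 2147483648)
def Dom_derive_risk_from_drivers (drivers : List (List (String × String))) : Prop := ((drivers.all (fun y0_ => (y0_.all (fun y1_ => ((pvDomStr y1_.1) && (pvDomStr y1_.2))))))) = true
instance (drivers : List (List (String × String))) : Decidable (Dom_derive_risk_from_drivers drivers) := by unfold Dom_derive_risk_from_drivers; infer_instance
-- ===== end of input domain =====

-- B replaces A's scan of the priority list (membership test against the impacts) by a single
-- pass over the drivers collecting ranks and indexing the priority list at the minimum rank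
-- (objective: alternative decomposition, same cost).

-- ===== PORT A =====
def RISK_PRIORITY : List String := ["CRITICAL", "HIGH", "MEDIUM", "LOW"]

-- d["impact"]; exact under Pre_ (key present — Python raises KeyError otherwise)
def pvImpact (d : List (String × String)) : String :=
  ((PySem.Dict.mk d).get? "impact").getD ""

def derive_risk_from_drivers (drivers : List (List (String × String))) : String :=
  if drivers = [] then "LOW"
  else
    let impacts := drivers.map pvImpact
    match RISK_PRIORITY.find? (fun p => impacts.contains p) with
    | some p => p
    | none => "LOW"

-- ===== PORT B =====
def derive_risk_from_drivers_alt (drivers : List (List (String × String))) : String :=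
  let ranks := drivers.filterMap (fun d => PySem.List.index? RISK_PRIORITY (pvImpact d))
  match PySem.List.min? ranks (fun r => r) with
  | some r => (PySem.List.pyGet? RISK_PRIORITY (r : Int)).getD "LOW"
  | none => "LOW"

-- ===== PRECONDITION & SPEC =====
-- Pre_ excludes drivers lacking an "impact" key: there Python A (and B) raise KeyError.
def Pre_derive_risk_from_drivers (drivers : List (List (String × String))) : Prop :=
  (drivers.all (fun d => (PySem.Dict.mk d).contains "impact")) = true
instance (drivers : List (List (String × String))) : Decidable (Pre_derive_risk_from_drivers drivers) := by unfold Pre_derive_risk_from_drivers; infer_instance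

def pvWitness_derive_risk_from_drivers : (List (List (String × String))) :=
  [[("impact", "HIGH")], [("impact", "MEDIUM")]]

def Spec_derive_risk_from_drivers (drivers : List (List (String × String))) (out : String) : Prop := out = derive_risk_from_drivers_alt drivers
instance (drivers : List (List (String × String))) (out : String) : Decidable (Spec_derive_risk_from_drivers drivers out) := by unfold Spec_derive_risk_from_drivers; infer_instance

-- ===== CLAIM (what is proved, stated in full; the proofs are below) =====
def Claim_equal_derive_risk_from_drivers : Prop := ∀ (drivers : List (List (String × String))), Dom_derive_risk_from_drivers drivers → Pre_derive_risk_from_drivers drivers → Spec_derive_risk_from_drivers drivers (derive_risk_from_drivers drivers)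

-- ===== LEMMAS AND PROOFS =====

-- the rank of the best impact present, 4 = none present
def pvBest (impacts : List String) : Nat :=
  if impacts.contains "CRITICAL" then 0
  else if impacts.contains "HIGH" then 1
  else if impacts.contains "MEDIUM" then 2
  else if impacts.contains "LOW" then 3
  else 4

lemma pv_foldl_min_le (t : List Nat) : ∀ a : Nat, t.foldl min a ≤ a := by
  induction t with
  | nil => simp
  | cons y t ih =>
    intro a
    have h := ih (min a y)
    simp only [List.foldl_cons]
    omega

lemma pv_foldl_min (impacts : List String) : ∀ a : Nat, a ≤ 4 →
    (impacts.filterMap (fun s => PySem.List.index? RISK_PRIORITY s)).foldl min a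
      = min a (pvBest impacts) := by
  induction impacts with
  | nil => intro a ha; simp [pvBest]; omega
  | cons s rest ih =>
    intro a ha
    by_cases h0 : s = "CRITICAL"
    · subst h0
      rw [List.filterMap_cons_some (by decide : PySem.List.index? RISK_PRIORITY "CRITICAL" = some 0),
        List.foldl_cons, ih (min a 0) (by omega)]
      simp [pvBest]
    · by_cases h1 : s = "HIGH"
      · subst h1
        rw [List.filterMap_cons_some (by decide : PySem.List.index? RISK_PRIORITY "HIGH" = some 1),
          List.foldl_cons, ih (min a 1) (by omega)]
        simp only [pvBest, List.contains_cons]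
        simp only [show (("CRITICAL" : String) == "HIGH") = false by decide,
          show (("HIGH" : String) == "HIGH") = true by decide,
          show (("MEDIUM" : String) == "HIGH") = false by decide,
          show (("LOW" : String) == "HIGH") = false by decide, Bool.false_or, Bool.true_or,
          if_true]
        split_ifs <;> omega
      · by_cases h2 : s = "MEDIUM"
        · subst h2
          rw [List.filterMap_cons_some (by decide : PySem.List.index? RISK_PRIORITY "MEDIUM" = some 2),
            List.foldl_cons, ih (min a 2) (by omega)]
          simp only [pvBest, List.contains_cons]
          simp only [show (("CRITICAL" : String) == "MEDIUM") = false by decide,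
            show (("HIGH" : String) == "MEDIUM") = false by decide,
            show (("MEDIUM" : String) == "MEDIUM") = true by decide,
            show (("LOW" : String) == "MEDIUM") = false by decide, Bool.false_or, Bool.true_or,
            if_true]
          split_ifs <;> omega
        · by_cases h3 : s = "LOW"
          · subst h3
            rw [List.filterMap_cons_some (by decide : PySem.List.index? RISK_PRIORITY "LOW" = some 3),
              List.foldl_cons, ih (min a 3) (by omega)]
            simp only [pvBest, List.contains_cons]
            simp only [show (("CRITICAL" : String) == "LOW") = false by decide,
              show (("HIGH" : String) == "LOW") = false by decide,
              show (("MEDIUM" : String) == "LOW") = false by decide,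
              show (("LOW" : String) == "LOW") = true by decide, Bool.false_or, Bool.true_or,
              if_true]
            split_ifs <;> omega
          · have hnone : PySem.List.index? RISK_PRIORITY s = none := by
              rw [PySem.List.index?_eq_none_iff]
              simp [RISK_PRIORITY]
              exact ⟨h0, h1, h2, h3⟩
            rw [List.filterMap_cons_none hnone, ih a ha]
            have hb : pvBest (s :: rest) = pvBest rest := by
              simp only [pvBest, List.contains_cons]
              simp only [show (("CRITICAL" : String) == s) = false by simp [Ne.symm h0],
                show (("HIGH" : String) == s) = false by simp [Ne.symm h1],
                show (("MEDIUM" : String) == s) = false by simp [Ne.symm h2],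
                show (("LOW" : String) == s) = false by simp [Ne.symm h3], Bool.false_or]
            rw [hb]

-- the core fact, stated on an arbitrary impacts list
lemma pv_core (impacts : List String) :
    (match PySem.List.min? (impacts.filterMap (fun s => PySem.List.index? RISK_PRIORITY s)) (fun r => r) with
     | some r => (PySem.List.pyGet? RISK_PRIORITY (r : Int)).getD "LOW"
     | none => "LOW")
    = (match RISK_PRIORITY.find? (fun p => impacts.contains p) with
       | some p => p
       | none => "LOW") := by
  rcases hr : impacts.filterMap (fun s => PySem.List.index? RISK_PRIORITY s) with _ | ⟨x, t⟩
  · -- no driver has a recognised impact: all four priorities are absent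
    have hmem : ∀ p ∈ RISK_PRIORITY, p ∉ impacts := by
      intro p hp hpm
      have hnone := List.filterMap_eq_nil_iff.mp hr p hpm
      have hnotin : p ∉ RISK_PRIORITY := by
        have h := PySem.List.index?_eq_none_iff (xs := RISK_PRIORITY) (v := p)
        exact h.mp hnone
      exact hnotin hp
    have hf : RISK_PRIORITY.find? (fun p => impacts.contains p) = none := by
      rw [List.find?_eq_none]
      intro p hp
      simpa using hmem p hp
    rw [hf]
    simp [PySem.List.min?]
  · -- some recognised impact exists; the minimum rank is pvBest impacts
    have hx4 : x < 4 := by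
      have hxm : (x : Nat) ∈ impacts.filterMap (fun s => PySem.List.index? RISK_PRIORITY s) := by
        rw [hr]; exact List.mem_cons_self
      rcases List.mem_filterMap.mp hxm with ⟨s, _, hs⟩
      rcases PySem.List.getElem_of_index?_eq_some hs with ⟨hk, _⟩
      simpa [RISK_PRIORITY] using hk
    have hfold : t.foldl min x = pvBest impacts := by
      have h4 := pv_foldl_min impacts 4 (by omega)
      rw [hr] at h4
      have hx : min 4 x = x := by omega
      simp only [List.foldl_cons, hx] at h4
      have hble : pvBest impacts ≤ 4 := by unfold pvBest; split_ifs <;> omega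
      omega
    rw [PySem.List.min?_id_cons, hfold]
    have hblt : pvBest impacts < 4 := by
      have hle : t.foldl min x ≤ x := pv_foldl_min_le t x
      omega
    unfold pvBest at hblt ⊢
    split_ifs at hblt ⊢ with c1 c2 c3 c4 <;>
      simp_all [RISK_PRIORITY, PySem.List.pyGet?, PySem.List.pyIdx?]

-- ===== VERDICT (by name: the statement is the Claim_ definition above) =====
theorem derive_risk_from_drivers_spec : Claim_equal_derive_risk_from_drivers := by
  intro drivers _ _
  unfold Spec_derive_risk_from_drivers derive_risk_from_drivers derive_risk_from_drivers_alt
  by_cases hd : drivers = []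
  · subst hd; simp [PySem.List.min?]
  · simp only [hd, if_false]
    rw [← pv_core (drivers.map pvImpact)]
    simp [List.filterMap_map, Function.comp]
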